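-- pv_equiv track=rewrite | github.com/trandangtien1122/introduction_ai_hcmut_CO3061_003444 | main.py | count_scores
-- ===== SOURCE A (Python) =====
-- def count_scores(board: list):
--     count_1 = 0
--     count_minus_1 = 0
--     for row in board:
--         for num in row:
--             if num == 1:
--                 count_1 += 1
--             elif num == -1:
--                 count_minus_1 += 1
--     return count_1, count_minus_1
-- ===== SOURCE B (Python) =====
-- def count_scores(board: list):
--     flat = [num for row in board for num in row]
--     return flat.count(1), flat.count(-1)
-- ===== Notes on version B (the rewrite author's own statement) =====
-- stated objective: idiomatic
-- what changed: Replaces the branching two-accumulator nested loop with a flatten comprehension followed by two list.count lookups (tally-style, no explicit branches).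
import Mathlib
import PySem

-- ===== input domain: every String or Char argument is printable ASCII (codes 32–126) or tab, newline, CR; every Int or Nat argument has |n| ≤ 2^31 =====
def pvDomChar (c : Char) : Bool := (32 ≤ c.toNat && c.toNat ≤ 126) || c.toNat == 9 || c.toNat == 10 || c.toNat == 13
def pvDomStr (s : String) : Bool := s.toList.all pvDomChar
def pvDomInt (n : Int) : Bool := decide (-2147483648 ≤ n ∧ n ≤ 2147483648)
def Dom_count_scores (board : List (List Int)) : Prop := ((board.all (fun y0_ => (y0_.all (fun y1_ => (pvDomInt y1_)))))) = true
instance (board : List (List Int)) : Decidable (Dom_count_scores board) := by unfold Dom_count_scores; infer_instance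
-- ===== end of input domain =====

-- B flattens the board once and returns two list.count tallies instead of A's branching two-accumulator loop (idiomatic; return value only).
-- ===== PORT A =====
def count_scores (board : List (List Int)) : Int × Int :=
  board.foldl
    (fun counts row =>
      row.foldl
        (fun (counts : Int × Int) num =>
          if num = 1 then (counts.1 + 1, counts.2)
          else if num = -1 then (counts.1, counts.2 + 1)
          else counts)
        counts)
    (0, 0)

-- ===== PORT B =====
def count_scores_alt (board : List (List Int)) : Int × Int :=
  let flat := board.flatMap (fun row => row.map (fun num => num))
  (PySem.List.count flat 1, PySem.List.count flat (-1))

-- ===== PRECONDITION & SPEC =====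
def Spec_count_scores (board : List (List Int)) (out : Int × Int) : Prop := out = count_scores_alt board
instance (board : List (List Int)) (out : Int × Int) : Decidable (Spec_count_scores board out) := by unfold Spec_count_scores; infer_instance

-- ===== CLAIM (what is proved, stated in full; the proofs are below) =====
def Claim_equal_count_scores : Prop := ∀ (board : List (List Int)), Dom_count_scores board → Spec_count_scores board (count_scores board)

-- ===== LEMMAS AND PROOFS =====

-- ===== VERDICT (by name: the statement is the Claim_ definition above) =====
lemma inner_loop (row : List Int) (a b : Int) :
    row.foldl
      (fun (counts : Int × Int) num =>
        if num = 1 then (counts.1 + 1, counts.2)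
        else if num = -1 then (counts.1, counts.2 + 1)
        else counts)
      (a, b)
    = (a + row.count 1, b + row.count (-1)) := by
  induction row generalizing a b with
  | nil => simp
  | cons x xs ih =>
    by_cases h1 : x = 1
    · subst h1; simp [List.foldl_cons, ih]; ring
    · by_cases h2 : x = -1
      · subst h2; simp [List.foldl_cons, ih, h1]; ring
      · simp [List.foldl_cons, ih, h1, h2]

lemma outer_loop (board : List (List Int)) (a b : Int) :
    board.foldl
      (fun counts row =>
        row.foldl
          (fun (counts : Int × Int) num =>
            if num = 1 then (counts.1 + 1, counts.2)
            else if num = -1 then (counts.1, counts.2 + 1)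
            else counts)
          counts)
      (a, b)
    = (a + (board.flatMap (fun row => row)).count 1,
       b + (board.flatMap (fun row => row)).count (-1)) := by
  induction board generalizing a b with
  | nil => simp
  | cons r rs ih =>
    simp [List.foldl_cons, inner_loop, ih, List.count_append]
    constructor <;> ring

theorem count_scores_spec : Claim_equal_count_scores := by
  intro board _
  unfold Spec_count_scores count_scores count_scores_alt
  simp [outer_loop, PySem.List.count_eq]
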